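-- pv_equiv track=rewrite | github.com/NicholasAntoniadesEngineer/llm_game | orchestration/placement.py | _find_poorly_connected_buildings
-- ===== SOURCE A (Python) =====
-- def _find_poorly_connected_buildings(building_tiles: set, road_tiles: set, max_distance: int) -> set:
--     """Find buildings that are poorly connected to the road network."""
--     poorly_connected = set()
--
--     for building_tile in building_tiles:
--         # Check if building has road access within max_distance
--         has_access = False
--         bx, by = building_tile
--
--         # Check tiles within max_distance
--         for dx in range(-max_distance, max_distance + 1):
--             for dy in range(-max_distance, max_distance + 1):
--                 if abs(dx) + abs(dy) > max_distance:
--                     continue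
--
--                 check_x, check_y = bx + dx, by + dy
--                 if (check_x, check_y) in road_tiles:
--                     has_access = True
--                     break
--             if has_access:
--                 break
--
--         if not has_access:
--             poorly_connected.add(building_tile)
--
--     return poorly_connected
-- ===== SOURCE B (Python) =====
-- def _find_poorly_connected_buildings(building_tiles: set, road_tiles: set, max_distance: int) -> set:
--     """A building is poorly connected iff every road tile is strictly farther
--     than max_distance in Manhattan distance."""
--     return {(bx, by) for (bx, by) in building_tiles
--             if all(abs(bx - rx) + abs(by - ry) > max_distance for (rx, ry) in road_tiles)}
-- ===== Notes on version B (the rewrite author's own statement) =====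
-- stated objective: faster
-- what changed: B replaces A's per-building scan of the whole Manhattan diamond of offsets (O(d^2) membership tests per building) by a direct Manhattan-distance test against the road tiles, written as a single set comprehension.
import Mathlib
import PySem

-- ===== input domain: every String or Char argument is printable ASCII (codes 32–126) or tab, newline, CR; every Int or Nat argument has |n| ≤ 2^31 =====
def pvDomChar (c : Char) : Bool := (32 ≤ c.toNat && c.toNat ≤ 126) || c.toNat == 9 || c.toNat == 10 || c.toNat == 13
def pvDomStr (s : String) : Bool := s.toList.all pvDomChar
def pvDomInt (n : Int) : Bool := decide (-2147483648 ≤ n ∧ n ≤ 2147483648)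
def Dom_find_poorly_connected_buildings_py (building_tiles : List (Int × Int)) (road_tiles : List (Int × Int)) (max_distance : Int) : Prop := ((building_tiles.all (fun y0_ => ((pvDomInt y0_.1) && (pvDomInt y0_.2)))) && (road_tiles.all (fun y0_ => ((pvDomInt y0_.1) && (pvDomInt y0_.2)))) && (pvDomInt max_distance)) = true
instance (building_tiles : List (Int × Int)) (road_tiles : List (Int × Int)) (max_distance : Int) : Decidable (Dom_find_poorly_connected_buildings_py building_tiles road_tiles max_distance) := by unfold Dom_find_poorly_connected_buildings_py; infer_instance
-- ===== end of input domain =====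

-- B tests each building directly against the road tiles by Manhattan distance instead of
-- scanning A's whole O(d^2) diamond of offsets; return values are equal (both are sets).

-- ===== PORT A =====
def find_poorly_connected_buildings_py (building_tiles : List (Int × Int)) (road_tiles : List (Int × Int)) (max_distance : Int) : List (Int × Int) :=
  building_tiles.foldl (fun poorly_connected building_tile =>
    let bx := building_tile.1
    let bY := building_tile.2
    let has_access :=
      (PySem.List.pyRange (-max_distance) (max_distance + 1) 1).any (fun dx =>
        (PySem.List.pyRange (-max_distance) (max_distance + 1) 1).any (fun dy =>
          if |dx| + |dy| > max_distance then false
          else road_tiles.contains (bx + dx, bY + dy)))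
    if !has_access then PySem.Set.add poorly_connected building_tile else poorly_connected)
    PySem.Set.empty

-- ===== PORT B =====
def find_poorly_connected_buildings_py_alt (building_tiles : List (Int × Int)) (road_tiles : List (Int × Int)) (max_distance : Int) : List (Int × Int) :=
  PySem.Set.ofList (building_tiles.filter (fun b =>
    road_tiles.all (fun r => |b.1 - r.1| + |b.2 - r.2| > max_distance)))

-- ===== PRECONDITION & SPEC =====
def Spec_find_poorly_connected_buildings_py (building_tiles : List (Int × Int)) (road_tiles : List (Int × Int)) (max_distance : Int) (out : List (Int × Int)) : Prop := out = find_poorly_connected_buildings_py_alt building_tiles road_tiles max_distance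
instance (building_tiles : List (Int × Int)) (road_tiles : List (Int × Int)) (max_distance : Int) (out : List (Int × Int)) : Decidable (Spec_find_poorly_connected_buildings_py building_tiles road_tiles max_distance out) := by unfold Spec_find_poorly_connected_buildings_py; infer_instance

-- ===== CLAIM (what is proved, stated in full; the proofs are below) =====
def Claim_equal_find_poorly_connected_buildings_py : Prop := ∀ (building_tiles : List (Int × Int)) (road_tiles : List (Int × Int)) (max_distance : Int), Dom_find_poorly_connected_buildings_py building_tiles road_tiles max_distance → Spec_find_poorly_connected_buildings_py building_tiles road_tiles max_distance (find_poorly_connected_buildings_py building_tiles road_tiles max_distance)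

-- ===== LEMMAS AND PROOFS =====


-- A's diamond scan over offsets finds a road within max_distance iff some road tile
-- is within Manhattan distance max_distance of the building.
theorem pv_access_eq (road_tiles : List (Int × Int)) (bx bY d : Int) :
    ((PySem.List.pyRange (-d) (d + 1) 1).any (fun dx =>
        (PySem.List.pyRange (-d) (d + 1) 1).any (fun dy =>
          if |dx| + |dy| > d then false
          else road_tiles.contains (bx + dx, bY + dy))))
    = !(road_tiles.all (fun r => |bx - r.1| + |bY - r.2| > d)) := by
  apply Bool.eq_iff_iff.mpr
  simp only [List.any_eq_true, List.all_eq_false, PySem.List.mem_pyRange_one,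
    Bool.not_eq_true', decide_eq_true_eq, not_lt]
  constructor
  · rintro ⟨dx, ⟨hdx1, hdx2⟩, dy, ⟨hdy1, hdy2⟩, hif⟩
    split at hif
    · exact absurd hif (by simp)
    · rename_i hle
      simp only [not_lt] at hle
      refine ⟨(bx + dx, bY + dy), List.contains_iff_mem.mp hif, ?_⟩
      have h1 : bx - (bx + dx) = -dx := by ring
      have h2 : bY - (bY + dy) = -dy := by ring
      rw [h1, h2, abs_neg, abs_neg]
      exact hle
  · rintro ⟨r, hr, hd⟩
    have hx := abs_sub_comm bx r.1
    have hy := abs_sub_comm bY r.2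
    have hax1 := le_abs_self (r.1 - bx)
    have hax2 := neg_abs_le (r.1 - bx)
    have hay1 := le_abs_self (r.2 - bY)
    have hay2 := neg_abs_le (r.2 - bY)
    have hnx := abs_nonneg (r.1 - bx)
    have hny := abs_nonneg (r.2 - bY)
    rw [hx, hy] at hd
    refine ⟨r.1 - bx, ⟨by omega, by omega⟩, r.2 - bY, ⟨by omega, by omega⟩, ?_⟩
    rw [if_neg (by omega)]
    have : (bx + (r.1 - bx), bY + (r.2 - bY)) = r := by
      obtain ⟨r1, r2⟩ := r; simp
    rw [this]
    exact List.contains_iff_mem.mpr hr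

-- folding a conditional Set.add is folding Set.add over the filtered list
theorem pv_foldl_filter_add {α : Type} [BEq α] (p : α → Bool) (l : List α) (s : PySem.Set α) :
    l.foldl (fun acc b => if p b then PySem.Set.add acc b else acc) s
      = (l.filter p).foldl PySem.Set.add s := by
  induction l generalizing s with
  | nil => rfl
  | cons x xs ih =>
    simp only [List.foldl_cons, List.filter_cons]
    by_cases h : p x = true <;> simp [h, ih]

-- ===== VERDICT (by name: the statement is the Claim_ definition above) =====
theorem find_poorly_connected_buildings_py_spec : Claim_equal_find_poorly_connected_buildings_py := by
  intro building_tiles road_tiles max_distance _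
  show _ = _
  unfold find_poorly_connected_buildings_py find_poorly_connected_buildings_py_alt
  simp only [pv_access_eq, Bool.not_not]
  rw [PySem.Set.ofList_eq_foldl, pv_foldl_filter_add]
  rfl
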